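-- pv_equiv track=rewrite | github.com/davidchim/Open-Anti-Browser | backend/browser_manager.py | _ensure_sequence_name
-- ===== SOURCE A (Python) =====
-- def _ensure_sequence_name(raw_name: str, existing_names) -> str:
--     name = str(raw_name or "").strip()
--     if name:
--         return name
--
--     used_numbers = set()
--     for item in existing_names:
--         text = str(item or "").strip()
--         if text.isdigit():
--             used_numbers.add(int(text))
--
--     next_number = 1
--     while next_number in used_numbers:
--         next_number += 1
--     return str(next_number)
-- ===== SOURCE B (Python) =====
-- def _ensure_sequence_name(raw_name: str, existing_names) -> str:
--     name = str(raw_name or "").strip()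
--     if name:
--         return name
--
--     nums = sorted(int(t) for t in
--                   (str(item or "").strip() for item in existing_names)
--                   if t.isdigit())
--     expected = 1
--     for v in nums:
--         if v > expected:
--             break
--         if v == expected:
--             expected += 1
--     return str(expected)
-- ===== Notes on version B (the rewrite author's own statement) =====
-- stated objective: alternative
-- what changed: Replaces the set-plus-incrementing-membership-probe with collecting the digit values into a list, sorting it, and one sorted scan that walks an expected counter past duplicates to the first gap.
import Mathlib
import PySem

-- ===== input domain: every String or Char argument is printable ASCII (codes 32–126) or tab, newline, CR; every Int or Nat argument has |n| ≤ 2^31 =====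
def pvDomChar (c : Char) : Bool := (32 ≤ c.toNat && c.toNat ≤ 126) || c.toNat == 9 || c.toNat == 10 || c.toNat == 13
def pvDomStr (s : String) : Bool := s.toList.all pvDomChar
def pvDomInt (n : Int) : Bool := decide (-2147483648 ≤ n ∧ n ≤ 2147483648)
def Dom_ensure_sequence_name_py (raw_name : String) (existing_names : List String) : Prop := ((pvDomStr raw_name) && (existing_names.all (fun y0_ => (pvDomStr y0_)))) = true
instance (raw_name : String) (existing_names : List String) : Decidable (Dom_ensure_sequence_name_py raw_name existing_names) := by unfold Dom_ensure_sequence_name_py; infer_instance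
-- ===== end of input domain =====

-- B replaces A's set + incrementing membership probe by sort-then-scan-for-first-gap; same results, similar cost (objective: alternative).

-- ===== PORT A =====
-- the int value of a stripped digit string (int(text); text.isdigit() guarantees the parse succeeds)
def pvNumVal (text : String) : Int := (PySem.Int.ofStr? text).getD 0

-- 'while next_number in used_numbers: next_number += 1'; fuel only makes the loop total
-- (used has no duplicates, so used.length + 1 steps always suffice)
def pvProbe (used : PySem.Set Int) : Int → Nat → Int
  | k, 0 => k
  | k, fuel + 1 => if PySem.Set.contains used k then pvProbe used (k + 1) fuel else k

def ensure_sequence_name_py (raw_name : String) (existing_names : List String) : String :=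
  let name := PySem.Str.strip raw_name
  if name ≠ "" then name
  else
    let used : PySem.Set Int := existing_names.foldl
      (fun s item =>
        let text := PySem.Str.strip item
        if PySem.Str.strIsdigit text then PySem.Set.add s (pvNumVal text) else s)
      PySem.Set.empty
    PySem.Int.toStr (pvProbe used 1 (used.length + 1))

-- ===== PORT B =====
-- 'for v in nums: if v > expected: break; if v == expected: expected += 1' then 'return str(expected)'
def pvScan : List Int → Int → Int
  | [], c => c
  | v :: t, c => if v > c then c else if v = c then pvScan t (c + 1) else pvScan t c

def ensure_sequence_name_py_alt (raw_name : String) (existing_names : List String) : String :=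
  let name := PySem.Str.strip raw_name
  if name ≠ "" then name
  else
    let nums := PySem.List.sorted
      (existing_names.filterMap (fun item =>
        let t := PySem.Str.strip item
        if PySem.Str.strIsdigit t then some (pvNumVal t) else none))
      (fun x => x) false
    PySem.Int.toStr (pvScan nums 1)

-- ===== PRECONDITION & SPEC =====
def Spec_ensure_sequence_name_py (raw_name : String) (existing_names : List String) (out : String) : Prop := out = ensure_sequence_name_py_alt raw_name existing_names
instance (raw_name : String) (existing_names : List String) (out : String) : Decidable (Spec_ensure_sequence_name_py raw_name existing_names out) := by unfold Spec_ensure_sequence_name_py; infer_instance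

-- ===== CLAIM (what is proved, stated in full; the proofs are below) =====
def Claim_equal_ensure_sequence_name_py : Prop := ∀ (raw_name : String) (existing_names : List String), Dom_ensure_sequence_name_py raw_name existing_names → Spec_ensure_sequence_name_py raw_name existing_names (ensure_sequence_name_py raw_name existing_names)

-- ===== LEMMAS AND PROOFS =====

-- r is the least integer ≥ c not in S
def IsLeastFree (S : List Int) (c r : Int) : Prop :=
  c ≤ r ∧ r ∉ S ∧ ∀ m, c ≤ m → m < r → m ∈ S

theorem isLeastFree_unique {S T : List Int} {c r r' : Int}
    (hS : IsLeastFree S c r) (hT : IsLeastFree T c r')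
    (hmem : ∀ x, x ∈ S ↔ x ∈ T) : r = r' := by
  obtain ⟨hc, hnS, hltS⟩ := hS
  obtain ⟨hc', hnT, hltT⟩ := hT
  by_contra hne
  rcases lt_or_gt_of_ne hne with h | h
  · exact hnS ((hmem r).2 (hltT r hc h))
  · exact hnT ((hmem r').1 (hltS r' hc' h))

theorem filter_le_succ_lt {l : List Int} {k : Int} (hk : k ∈ l) :
    (l.filter (fun x => decide (k + 1 ≤ x))).length < (l.filter (fun x => decide (k ≤ x))).length := by
  have hsub : ∀ (t : List Int),
      (t.filter (fun x => decide (k + 1 ≤ x))).Sublist (t.filter (fun x => decide (k ≤ x))) := by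
    intro t
    apply List.monotone_filter_right
    intro x hx
    simp at hx ⊢; omega
  induction l with
  | nil => cases hk
  | cons a t ih =>
    simp only [List.filter_cons]
    by_cases hak : a = k
    · have d1 : decide (k ≤ a) = true := by simp [hak]
      have d2 : decide (k + 1 ≤ a) = false := by simp [hak]
      rw [d1, d2]
      have := (hsub t).length_le
      simp only [if_true, Bool.false_eq_true, if_false, List.length_cons]
      omega
    · have ha : k ∈ t := by
        rcases List.mem_cons.1 hk with h | h
        · exact absurd h.symm hak
        · exact h
      have ih' := ih ha
      by_cases h1 : k ≤ a
      · have d1 : decide (k ≤ a) = true := by simp [h1]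
        by_cases h2 : k + 1 ≤ a
        · have d2 : decide (k + 1 ≤ a) = true := by simp [h2]
          rw [d1, d2]
          simp only [if_true, List.length_cons]
          omega
        · have d2 : decide (k + 1 ≤ a) = false := by simp [h2]
          rw [d1, d2]
          simp only [if_true, Bool.false_eq_true, if_false, List.length_cons]
          omega
      · have d1 : decide (k ≤ a) = false := by simp [h1]
        have d2 : decide (k + 1 ≤ a) = false := by simp; omega
        rw [d1, d2]
        simpa using ih'

theorem pvProbe_succ (used : PySem.Set Int) (k : Int) (f : Nat) :
    pvProbe used k (f + 1) = if PySem.Set.contains used k then pvProbe used (k + 1) f else k := rfl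

theorem pvProbe_least (used : PySem.Set Int) :
    ∀ (fuel : Nat) (k : Int),
      (used.filter (fun x => decide (k ≤ x))).length < fuel →
      IsLeastFree used k (pvProbe used k fuel) := by
  intro fuel
  induction fuel with
  | zero => intro k h; omega
  | succ f ih =>
    intro k h
    by_cases hk : PySem.Set.contains used k = true
    · have hkmem : k ∈ used := (PySem.Set.contains_iff used k).1 hk
      rw [pvProbe_succ, if_pos hk]
      obtain ⟨hc, hn, hl⟩ := ih (k + 1)
        (by have := filter_le_succ_lt (l := used) hkmem; omega)
      exact ⟨by omega, hn, fun m hm1 hm2 =>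
        if hmk : m = k then hmk ▸ hkmem else hl m (by omega) hm2⟩
    · have hkmem : k ∉ used := fun hm => hk ((PySem.Set.contains_iff used k).2 hm)
      rw [pvProbe_succ, if_neg (by simpa using hk)]
      exact ⟨le_refl k, hkmem, fun m hm1 hm2 => absurd hm2 (by omega)⟩

theorem pvScan_nil (c : Int) : pvScan [] c = c := rfl

theorem pvScan_cons (v : Int) (t : List Int) (c : Int) :
    pvScan (v :: t) c = if v > c then c else if v = c then pvScan t (c + 1) else pvScan t c := rfl

theorem pvScan_least : ∀ (l : List Int) (c : Int), l.Pairwise (· ≤ ·) →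
    IsLeastFree l c (pvScan l c) := by
  intro l
  induction l with
  | nil =>
    intro c _
    refine ⟨by rw [pvScan_nil], by simp, fun m hm1 hm2 => ?_⟩
    rw [pvScan_nil] at hm2; exact absurd hm1 (by omega)
  | cons v t ih =>
    intro c hp
    have hpt := hp.of_cons
    have hvt : ∀ x ∈ t, v ≤ x := fun x hx => List.rel_of_pairwise_cons hp hx
    by_cases h1 : v > c
    · rw [pvScan_cons, if_pos h1]
      refine ⟨le_refl c, ?_, fun m hm1 hm2 => absurd hm1 (by omega)⟩
      intro hc
      rcases List.mem_cons.1 hc with h | h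
      · omega
      · exact absurd (hvt c h) (by omega)
    · rw [pvScan_cons, if_neg h1]
      by_cases h2 : v = c
      · rw [if_pos h2]
        obtain ⟨hc, hn, hl⟩ := ih (c + 1) hpt
        refine ⟨by omega, ?_, ?_⟩
        · intro hc'
          rcases List.mem_cons.1 hc' with he | hc'
          · omega
          · exact hn hc'
        · intro m hm1 hm2
          by_cases hmc : m = c
          · exact List.mem_cons.2 (Or.inl (by omega))
          · exact List.mem_cons.2 (Or.inr (hl m (by omega) hm2))
      · rw [if_neg h2]
        obtain ⟨hc, hn, hl⟩ := ih c hpt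
        refine ⟨hc, ?_, fun m hm1 hm2 => List.mem_cons.2 (Or.inr (hl m hm1 hm2))⟩
        intro hc'
        rcases List.mem_cons.1 hc' with he | hc'
        · omega
        · exact hn hc'

-- A's set-building loop rewritten as 'foldl Set.add' over the filtered values
theorem foldl_step_eq (l : List String) : ∀ s : PySem.Set Int,
    l.foldl (fun s item =>
        let text := PySem.Str.strip item
        if PySem.Str.strIsdigit text then PySem.Set.add s (pvNumVal text) else s) s
    = (l.filterMap (fun item =>
        let t := PySem.Str.strip item
        if PySem.Str.strIsdigit t then some (pvNumVal t) else none)).foldl PySem.Set.add s := by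
  induction l with
  | nil => intro s; rfl
  | cons a t ih =>
    intro s
    simp at ih ⊢
    by_cases h : PySem.Chars.strIsdigit (PySem.Chars.strip a.toList) = true
    · simp [h, ih]
    · simp [h, ih]

theorem ensure_eq (raw_name : String) (existing_names : List String) :
    ensure_sequence_name_py raw_name existing_names
      = ensure_sequence_name_py_alt raw_name existing_names := by
  simp only [ensure_sequence_name_py, ensure_sequence_name_py_alt]
  by_cases hname : PySem.Str.strip raw_name ≠ ""
  · rw [if_pos hname, if_pos hname]
  · rw [if_neg hname, if_neg hname]
    rw [foldl_step_eq]
    have hempty : (PySem.Set.empty : PySem.Set Int) = [] := rfl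
    rw [hempty, ← PySem.Set.ofList_eq_foldl]
    set vals := existing_names.filterMap (fun item =>
      let t := PySem.Str.strip item
      if PySem.Str.strIsdigit t then some (pvNumVal t) else none) with hvals
    congr 1
    have hfuel : ((PySem.Set.ofList vals).filter (fun x => decide ((1:Int) ≤ x))).length
        < (PySem.Set.ofList vals).length + 1 := by
      have := List.length_filter_le (fun x => decide ((1:Int) ≤ x)) (PySem.Set.ofList vals)
      omega
    have hA := pvProbe_least (PySem.Set.ofList vals) ((PySem.Set.ofList vals).length + 1) 1 hfuel
    have hsortp : (PySem.List.sorted vals (fun x => x) false).Pairwise (· ≤ ·) := by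
      have := PySem.List.sorted_pairwise (xs := vals) (key := fun x => x) (κ := Int)
      simpa using this
    have hB := pvScan_least (PySem.List.sorted vals (fun x => x) false) 1 hsortp
    apply isLeastFree_unique hA hB
    intro x
    rw [PySem.Set.mem_ofList, PySem.List.mem_sorted]

-- ===== VERDICT (by name: the statement is the Claim_ definition above) =====
theorem ensure_sequence_name_py_spec : Claim_equal_ensure_sequence_name_py := by
  intro raw_name existing_names _
  exact ensure_eq raw_name existing_names
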